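-- pv_equiv track=rewrite | github.com/CaraJ7/CoMat | attr_concen_utils/gsam_interface.py | update_nouns_attributes
-- ===== SOURCE A (Python) =====
-- from collections import defaultdict
--
-- def update_nouns_attributes(nouns, attributes):
--     new_nouns, new_attributes = [], []
--     # rm duplicate nouns, do not calculate loss if there is duplicate nouns
--     nouns2idx = defaultdict(list)
--     for idx, n in enumerate(nouns):
--         nouns2idx[n].append(idx)
--     for n in nouns2idx:
--         if len(nouns2idx[n]) > 1:
--             continue
--         else:
--             new_nouns.append(n)
--             new_attributes.append(attributes[nouns2idx[n][0]])
--
--     # rm invalid nouns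
--     filtered_nouns, filtered_attributes = [], []
--     invalid_nouns = set(['scene', 'surface', 'area', 'atmosphere', 'noise', 'place', 'kitchen', 'dream', 'interior', 'exterior',
--     'meal', 'background', 'bathroom', 'room', 'scent', 'street', 'hillside', 'mountain', 'sky', 'sea', 'ocean', 'lost',
--     'language', 'skill', 'one', 'night', 'day', 'morning', 'space', 'environment', 'conditions', 'field', 'shore', 'restroom',
--     'party', 'grass', 'snow', 'meadow', 'water', 'shadow', 'waves', 'song', 'cycle', 'sunlight', 'mysteries', 'wall', 'salon',
--     'range', 'cry', 'speech', 'tone', 'thing', 'about', 'activity', 'air', 'advertisement', 'airport', 'also'])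
--
--     for idx, n in enumerate(new_nouns):
--         if n in invalid_nouns or n[:-1] in invalid_nouns:
--             continue
--         else:
--             filtered_nouns.append(n)
--             filtered_attributes.append(new_attributes[idx])
--
--
--     return filtered_nouns, filtered_attributes
-- ===== SOURCE B (Python) =====
-- from collections import Counter
--
-- def update_nouns_attributes(nouns, attributes):
--     invalid_nouns = set(['scene', 'surface', 'area', 'atmosphere', 'noise', 'place', 'kitchen', 'dream', 'interior', 'exterior',
--     'meal', 'background', 'bathroom', 'room', 'scent', 'street', 'hillside', 'mountain', 'sky', 'sea', 'ocean', 'lost',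
--     'language', 'skill', 'one', 'night', 'day', 'morning', 'space', 'environment', 'conditions', 'field', 'shore', 'restroom',
--     'party', 'grass', 'snow', 'meadow', 'water', 'shadow', 'waves', 'song', 'cycle', 'sunlight', 'mysteries', 'wall', 'salon',
--     'range', 'cry', 'speech', 'tone', 'thing', 'about', 'activity', 'air', 'advertisement', 'airport', 'also'])
--     count = Counter(nouns)
--     filtered_nouns, filtered_attributes = [], []
--     for idx, n in enumerate(nouns):
--         if count[n] == 1 and n not in invalid_nouns and n[:-1] not in invalid_nouns:
--             filtered_nouns.append(n)
--             filtered_attributes.append(attributes[idx])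
--     return filtered_nouns, filtered_attributes
-- ===== Notes on version B (the rewrite author's own statement) =====
-- stated objective: simpler
-- what changed: A builds a defaultdict of index lists, walks the dict to drop duplicate nouns into intermediate lists, then runs a second enumerate loop filtering invalid nouns; B counts noun frequencies once with collections.Counter and does a single fused pass over enumerate(nouns) keeping n when its count is 1 and neither n nor n[:-1] is invalid, with no intermediate lists.
import Mathlib
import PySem

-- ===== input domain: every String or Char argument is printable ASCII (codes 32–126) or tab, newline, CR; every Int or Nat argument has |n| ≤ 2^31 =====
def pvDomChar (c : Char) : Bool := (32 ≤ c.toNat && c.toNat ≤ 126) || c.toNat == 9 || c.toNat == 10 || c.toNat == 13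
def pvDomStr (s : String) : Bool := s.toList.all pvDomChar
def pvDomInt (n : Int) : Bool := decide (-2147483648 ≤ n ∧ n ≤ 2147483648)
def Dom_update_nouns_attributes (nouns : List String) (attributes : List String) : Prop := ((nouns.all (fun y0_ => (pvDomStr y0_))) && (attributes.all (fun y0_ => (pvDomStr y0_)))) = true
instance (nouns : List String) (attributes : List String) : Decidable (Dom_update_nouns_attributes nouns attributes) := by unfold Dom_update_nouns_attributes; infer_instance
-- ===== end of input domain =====

-- B fuses A's two passes (dict-of-index-lists dedup pass, then invalid-noun filter pass)
-- into ONE pass over enumerate(nouns) guarded by a Counter; objective: simpler.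
-- ===== PORT A =====
def pvInvalidList : List String := ["scene", "surface", "area", "atmosphere", "noise", "place", "kitchen", "dream", "interior", "exterior",
  "meal", "background", "bathroom", "room", "scent", "street", "hillside", "mountain", "sky", "sea", "ocean", "lost",
  "language", "skill", "one", "night", "day", "morning", "space", "environment", "conditions", "field", "shore", "restroom",
  "party", "grass", "snow", "meadow", "water", "shadow", "waves", "song", "cycle", "sunlight", "mysteries", "wall", "salon",
  "range", "cry", "speech", "tone", "thing", "about", "activity", "air", "advertisement", "airport", "also"]

def update_nouns_attributes (nouns : List String) (attributes : List String) : List String × List String :=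
  -- nouns2idx = defaultdict(list); for idx, n in enumerate(nouns): nouns2idx[n].append(idx)
  let nouns2idx : PySem.Dict String (List Int) :=
    (PySem.List.enumerate nouns).foldl (fun d p => d.modify p.2 [] (fun v => v ++ [p.1])) PySem.Dict.empty
  -- for n in nouns2idx: skip if len > 1 else append n and attributes[nouns2idx[n][0]]
  -- (attributes[...] via pyGetD: in range whenever the Python returns, i.e. on Pre_)
  let na : List String × List String :=
    nouns2idx.keys.foldl (fun acc n =>
      if (nouns2idx.getD n []).length > 1 then acc
      else (acc.1 ++ [n], acc.2 ++ [PySem.List.pyGetD attributes (PySem.List.pyGetD (nouns2idx.getD n []) 0 0) ""]))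
      ([], [])
  let invalid : PySem.Set String := PySem.Set.ofList pvInvalidList
  -- for idx, n in enumerate(new_nouns): skip invalid, else append n and new_attributes[idx]
  (PySem.List.enumerate na.1).foldl (fun acc p =>
      if invalid.contains p.2 || invalid.contains (PySem.Str.slice p.2 none (some (-1))) then acc
      else (acc.1 ++ [p.2], acc.2 ++ [PySem.List.pyGetD na.2 p.1 ""]))
    ([], [])

-- ===== PORT B =====
def update_nouns_attributes_alt (nouns : List String) (attributes : List String) : List String × List String :=
  let invalid : PySem.Set String := PySem.Set.ofList pvInvalidList
  let count : PySem.Dict String Int := PySem.Dict.counter nouns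
  (PySem.List.enumerate nouns).foldl (fun acc p =>
    if count.getD p.2 0 == 1 && !(invalid.contains p.2) && !(invalid.contains (PySem.Str.slice p.2 none (some (-1)))) then
      (acc.1 ++ [p.2], acc.2 ++ [PySem.List.pyGetD attributes p.1 ""])
    else acc) ([], [])

-- ===== PRECONDITION & SPEC =====
-- Pre_ excludes exactly the inputs where the Python A raises IndexError: some noun occurring
-- exactly once sits at an index with no matching attribute.
def Pre_update_nouns_attributes (nouns : List String) (attributes : List String) : Prop :=
  ∀ k : Fin nouns.length, List.count nouns[(k : Nat)] nouns = 1 → (k : Nat) < attributes.length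
instance (nouns : List String) (attributes : List String) : Decidable (Pre_update_nouns_attributes nouns attributes) := by unfold Pre_update_nouns_attributes; infer_instance
def pvWitness_update_nouns_attributes : List String × List String := (["cat"], ["red"])


def Spec_update_nouns_attributes (nouns : List String) (attributes : List String) (out : List String × List String) : Prop := out = update_nouns_attributes_alt nouns attributes
instance (nouns : List String) (attributes : List String) (out : List String × List String) : Decidable (Spec_update_nouns_attributes nouns attributes out) := by unfold Spec_update_nouns_attributes; infer_instance

-- ===== CLAIM (what is proved, stated in full; the proofs are below) =====
def Claim_equal_update_nouns_attributes : Prop := ∀ (nouns : List String) (attributes : List String), Dom_update_nouns_attributes nouns attributes → Pre_update_nouns_attributes nouns attributes → Spec_update_nouns_attributes nouns attributes (update_nouns_attributes nouns attributes)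

-- ===== LEMMAS AND PROOFS =====

def pvValidB (n : String) : Bool :=
  !((PySem.Set.ofList pvInvalidList).contains n || (PySem.Set.ofList pvInvalidList).contains (PySem.Str.slice n none (some (-1))))


theorem pvEnumFilterSnd {α : Type} (l : List α) (s : Int) (c : α → Bool) :
    ((PySem.List.enumerate l s).filter (fun p => c p.2)).map (fun p => p.2) = l.filter c := by
  conv_rhs => rw [← PySem.List.map_snd_enumerate l s]
  rw [List.filter_map]; rfl

theorem pvFilterLen {α : Type} [BEq α] [LawfulBEq α] (l : List α) (s : Int) (n : α) :
    ((PySem.List.enumerate l s).filter (fun p => p.2 == n)).length = List.count n l := by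
  rw [List.count_eq_length_filter]
  simpa using (congrArg List.length (pvEnumFilterSnd l s (fun y => y == n)))

theorem pvDedupFilter {α : Type} [BEq α] [LawfulBEq α] (l : List α) (q : α → Bool)
    (h : ∀ n, q n = true → List.count n l ≤ 1) :
    (PySem.Set.ofList l).filter q = l.filter q := by
  induction l with
  | nil => rfl
  | cons x t ih =>
    rw [PySem.Set.ofList_cons]
    have hsub : ∀ n, q n = true → List.count n t ≤ 1 := by
      intro n hn
      have := h n hn
      simp [List.count_cons] at this
      omega
    by_cases hq : q x = true
    · have hxt : x ∉ t := by
        have := h x hq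
        simp [List.count_cons] at this
        intro hm
        have : 1 ≤ List.count x t := List.one_le_count_iff.mpr hm
        omega
      have : List.filter q ((PySem.Set.ofList t).discard x) = List.filter q (PySem.Set.ofList t) := by
        simp only [PySem.Set.discard, List.filter_filter]
        apply List.filter_congr
        intro y hy
        have hyt : y ∈ t := (PySem.Set.mem_ofList t y).mp hy
        have : (y == x) = false := by
          by_contra hc
          simp at hc
          subst hc; exact hxt hyt
        simp [this]
      simp [List.filter_cons, hq, this, ih hsub]
    · have hqx : q x = false := by simpa using hq
      have : List.filter q ((PySem.Set.ofList t).discard x) = List.filter q (PySem.Set.ofList t) := by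
        simp only [PySem.Set.discard, List.filter_filter]
        apply List.filter_congr
        intro y hy
        by_cases hqy : q y = true
        · have : (y == x) = false := by
            by_contra hc
            simp at hc; subst hc
            rw [hqy] at hqx; exact Bool.true_eq_false.mp hqx
          simp [this, hqy]
        · simp [Bool.eq_false_iff.mpr hqy]
      simp [List.filter_cons, hqx, this, ih hsub]

theorem pvSingleton {α : Type} [BEq α] [LawfulBEq α] (l : List α) (s : Int) (n : α)
    (h : List.count n l = 1) :
    ∃ i : Int, (PySem.List.enumerate l s).filter (fun p => p.2 == n) = [(i, n)] := by
  have hlen : ((PySem.List.enumerate l s).filter (fun p => p.2 == n)).length = 1 := by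
    rw [pvFilterLen l s n, h]
  obtain ⟨a, ha⟩ := List.length_eq_one_iff.mp hlen
  refine ⟨a.1, ?_⟩
  have hmem : a ∈ (PySem.List.enumerate l s).filter (fun p => p.2 == n) := by
    rw [ha]; exact List.mem_singleton.mpr rfl
  have h2 : a.2 = n := by
    have := List.of_mem_filter hmem
    simpa using this
  rw [ha]
  simp [← h2]

theorem pvDictGetD (nouns : List String) (n : String) :
    ((PySem.List.enumerate nouns).foldl (fun d p => d.modify p.2 [] (fun v => v ++ [p.1])) PySem.Dict.empty).getD n []
      = ((PySem.List.enumerate nouns).filter (fun p => p.2 == n)).map (fun p => p.1) := by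
  have hrw : (PySem.List.enumerate nouns).foldl (fun d p => d.modify p.2 [] (fun v => v ++ [p.1])) PySem.Dict.empty
      = ((PySem.List.enumerate nouns).map Prod.swap).foldl (fun d p => d.modify p.1 [] (fun v => v ++ [p.2])) PySem.Dict.empty := by
    rw [List.foldl_map]
    simp [Prod.swap]
  rw [hrw, PySem.Dict.getD_foldl_modify_append, PySem.Dict.getD_empty, List.filter_map, List.map_map]
  rfl

theorem pvKeysEq (nouns : List String) :
    ((PySem.List.enumerate nouns).foldl (fun d p => d.modify p.2 [] (fun v => v ++ [p.1])) PySem.Dict.empty).keys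
      = PySem.Set.ofList nouns := by
  rw [PySem.Dict.keys_foldl_modify_key (PySem.List.enumerate nouns) (fun p => p.2) []
        (fun _ p v => v ++ [p.1]) PySem.Dict.empty]
  rw [PySem.Dict.keys_empty, PySem.Set.update_nil_left, PySem.List.map_snd_enumerate]

theorem pvFoldlSkipPair' {α β γ : Type} (L : List α) (Q : α → Prop) [DecidablePred Q] (f : α → β) (g : α → γ) (as : List β) (bs : List γ) :
    L.foldl (fun acc p => if Q p then acc else (acc.1 ++ [f p], acc.2 ++ [g p])) (as, bs)
      = (as ++ (L.filter (fun p => !decide (Q p))).map f, bs ++ (L.filter (fun p => !decide (Q p))).map g) := by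
  induction L generalizing as bs with
  | nil => simp
  | cons x t ih => by_cases hx : Q x <;> simp [hx, ih]

theorem pvFoldlKeepPair' {α β γ : Type} (L : List α) (Q : α → Prop) [DecidablePred Q] (f : α → β) (g : α → γ) (as : List β) (bs : List γ) :
    L.foldl (fun acc p => if Q p then (acc.1 ++ [f p], acc.2 ++ [g p]) else acc) (as, bs)
      = (as ++ (L.filter (fun p => decide (Q p))).map f, bs ++ (L.filter (fun p => decide (Q p))).map g) := by
  induction L generalizing as bs with
  | nil => simp
  | cons x t ih => by_cases hx : Q x <;> simp [hx, ih]

def pvC1 (nouns : List String) (n : String) : Bool := decide (List.count n nouns = 1)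
def pvG (nouns attributes : List String) (n : String) : String :=
  PySem.List.pyGetD attributes (PySem.List.pyGetD (((PySem.List.enumerate nouns).filter (fun p => p.2 == n)).map (fun p => p.1)) 0 0) ""
def pvF (nouns : List String) : List String := nouns.filter (fun n => pvC1 nouns n && pvValidB n)

theorem pvAsideEq (nouns attributes : List String) :
    update_nouns_attributes nouns attributes = (pvF nouns, (pvF nouns).map (pvG nouns attributes)) := by
  unfold update_nouns_attributes
  simp only [pvKeysEq, pvDictGetD]
  rw [pvFoldlSkipPair' (PySem.Set.ofList nouns)
      (fun n => (List.map (fun p => p.1) (List.filter (fun p => p.2 == n) (PySem.List.enumerate nouns))).length > 1)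
      (fun n => n)
      (fun n => PySem.List.pyGetD attributes (PySem.List.pyGetD (List.map (fun p => p.1) (List.filter (fun p => p.2 == n) (PySem.List.enumerate nouns))) 0 0) "")
      [] []]
  simp only [List.nil_append, List.map_id']
  have hU : (PySem.Set.ofList nouns).filter
        (fun n => !decide ((List.map (fun p => p.1) (List.filter (fun p => p.2 == n) (PySem.List.enumerate nouns))).length > 1))
      = nouns.filter (fun n => pvC1 nouns n) := by
    have hstep : (PySem.Set.ofList nouns).filter
          (fun n => !decide ((List.map (fun p => p.1) (List.filter (fun p => p.2 == n) (PySem.List.enumerate nouns))).length > 1))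
        = (PySem.Set.ofList nouns).filter (fun n => pvC1 nouns n) := by
      apply List.filter_congr
      intro n hn
      have hmem : n ∈ nouns := (PySem.Set.mem_ofList nouns n).mp hn
      have hc : 1 ≤ List.count n nouns := List.one_le_count_iff.mpr hmem
      rw [List.length_map, pvFilterLen]
      by_cases h1 : List.count n nouns = 1 <;> simp [pvC1, h1] <;> omega
    rw [hstep]
    exact pvDedupFilter nouns _ (fun n hn => by simpa [pvC1] using le_of_eq (of_decide_eq_true hn))
  rw [hU]
  rw [show (fun n => PySem.List.pyGetD attributes
        (PySem.List.pyGetD (List.map (fun p => p.1) (List.filter (fun p => p.2 == n) (PySem.List.enumerate nouns))) 0 0) "")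
      = pvG nouns attributes from rfl]
  rw [pvFoldlSkipPair' (PySem.List.enumerate (List.filter (fun n => pvC1 nouns n) nouns))
      (fun p => ((PySem.Set.ofList pvInvalidList).contains p.2 ||
          (PySem.Set.ofList pvInvalidList).contains (PySem.Str.slice p.2 none (some (-1)))) = true)
      (fun p => p.2)
      (fun p => PySem.List.pyGetD (List.map (pvG nouns attributes) (List.filter (fun n => pvC1 nouns n) nouns)) p.1 "")
      [] []]
  simp only [List.nil_append]
  have hb : ∀ b : Bool, (!decide (b = true)) = !b := by decide
  simp only [hb]
  have hfst : (List.filter (fun p => !((PySem.Set.ofList pvInvalidList).contains p.2 ||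
        (PySem.Set.ofList pvInvalidList).contains (PySem.Str.slice p.2 none (some (-1)))))
        (PySem.List.enumerate (List.filter (fun n => pvC1 nouns n) nouns))).map (fun p => p.2)
      = pvF nouns := by
    rw [pvEnumFilterSnd (List.filter (fun n => pvC1 nouns n) nouns) 0
        (fun y => !((PySem.Set.ofList pvInvalidList).contains y ||
          (PySem.Set.ofList pvInvalidList).contains (PySem.Str.slice y none (some (-1)))))]
    rw [List.filter_filter]
    simp only [pvF, pvValidB]
    apply List.filter_congr
    intro x _
    rw [Bool.and_comm]
  have hsnd : List.map
        (fun p => PySem.List.pyGetD (List.map (pvG nouns attributes) (List.filter (fun n => pvC1 nouns n) nouns)) p.1 "")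
        (List.filter
          (fun p =>
            !((PySem.Set.ofList pvInvalidList).contains p.2 ||
                (PySem.Set.ofList pvInvalidList).contains (PySem.Str.slice p.2 none (some (-1)))))
          (PySem.List.enumerate (List.filter (fun n => pvC1 nouns n) nouns)))
      = List.map (pvG nouns attributes) (pvF nouns) := by
    have hmm : ∀ p ∈ (List.filter
          (fun p =>
            !((PySem.Set.ofList pvInvalidList).contains p.2 ||
                (PySem.Set.ofList pvInvalidList).contains (PySem.Str.slice p.2 none (some (-1)))))
          (PySem.List.enumerate (List.filter (fun n => pvC1 nouns n) nouns))),
        PySem.List.pyGetD (List.map (pvG nouns attributes) (List.filter (fun n => pvC1 nouns n) nouns)) p.1 ""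
          = pvG nouns attributes p.2 := by
      intro p hp
      have hpe := List.mem_of_mem_filter hp
      rcases (PySem.List.mem_enumerate_iff _ _ _).mp hpe with ⟨k, hk, rfl⟩
      simp [PySem.List.pyGetD_natCast, List.getD_eq_getElem, hk]
    rw [List.map_congr_left hmm]
    rw [show (fun p : Int × String => pvG nouns attributes p.2)
          = (pvG nouns attributes) ∘ (fun p : Int × String => p.2) from rfl]
    rw [← List.map_map, hfst]
  rw [Prod.mk.injEq]
  exact ⟨hfst, hsnd⟩

theorem pvBsideEq (nouns attributes : List String) :
    update_nouns_attributes_alt nouns attributes = (pvF nouns, (pvF nouns).map (pvG nouns attributes)) := by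
  unfold update_nouns_attributes_alt
  simp only [PySem.Dict.getD_counter]
  rw [pvFoldlKeepPair' (PySem.List.enumerate nouns)
      (fun p => ((List.count p.2 nouns : Int) == 1 && !((PySem.Set.ofList pvInvalidList).contains p.2) &&
          !((PySem.Set.ofList pvInvalidList).contains (PySem.Str.slice p.2 none (some (-1))))) = true)
      (fun p => p.2) (fun p => PySem.List.pyGetD attributes p.1 "") [] []]
  simp only [List.nil_append]
  have hb : ∀ b : Bool, (decide (b = true)) = b := by decide
  simp only [hb]
  have hpred : List.filter
        (fun p => ((List.count p.2 nouns : Int)) == 1 && !((PySem.Set.ofList pvInvalidList).contains p.2) &&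
          !((PySem.Set.ofList pvInvalidList).contains (PySem.Str.slice p.2 none (some (-1)))))
        (PySem.List.enumerate nouns)
      = List.filter (fun p => pvC1 nouns p.2 && pvValidB p.2) (PySem.List.enumerate nouns) := by
    apply List.filter_congr
    intro p _
    have hc : (((List.count p.2 nouns : Nat) : Int) == 1) = pvC1 nouns p.2 := by
      by_cases h : List.count p.2 nouns = 1 <;> simp [pvC1, h]
    rw [Bool.and_assoc, hc, pvValidB, Bool.not_or]
  rw [hpred]
  have hfst : List.map (fun p => p.2)
        (List.filter (fun p => pvC1 nouns p.2 && pvValidB p.2) (PySem.List.enumerate nouns))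
      = pvF nouns := by
    rw [pvEnumFilterSnd nouns 0 (fun y => pvC1 nouns y && pvValidB y)]
    rfl
  have hmm : ∀ p ∈ List.filter (fun p => pvC1 nouns p.2 && pvValidB p.2) (PySem.List.enumerate nouns),
      PySem.List.pyGetD attributes p.1 "" = pvG nouns attributes p.2 := by
    intro p hp
    have hpe := List.mem_of_mem_filter hp
    have hq := List.of_mem_filter hp
    have hcount : List.count p.2 nouns = 1 := by
      have := (Bool.and_eq_true _ _).mp hq
      simpa [pvC1] using this.1
    rcases pvSingleton nouns 0 p.2 hcount with ⟨i, hi⟩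
    have hpmem : p ∈ List.filter (fun q => q.2 == p.2) (PySem.List.enumerate nouns) :=
      List.mem_filter.mpr ⟨hpe, by simp⟩
    rw [hi] at hpmem
    have hp1 : p = (i, p.2) := List.mem_singleton.mp hpmem
    rw [pvG, hi]
    have h1 : p.1 = i := by rw [hp1]
    rw [h1]
    simp [PySem.List.pyGetD_ofNat']
  rw [List.map_congr_left hmm]
  rw [show (fun p : Int × String => pvG nouns attributes p.2)
        = (pvG nouns attributes) ∘ (fun p : Int × String => p.2) from rfl]
  rw [← List.map_map, hfst]

theorem update_nouns_attributes_spec : Claim_equal_update_nouns_attributes := by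
  intro nouns attributes _ _
  show update_nouns_attributes nouns attributes = update_nouns_attributes_alt nouns attributes
  rw [pvAsideEq, pvBsideEq]
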